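-- pv_equiv track=rewrite | github.com/kumaryu-w/net | net_u-nihon_installer.py | creatpass
-- ===== SOURCE A (Python) =====
-- def creatpass(passW):
--     i=0
--     lists=list(passW)
--     listpass=lists
--     for li in lists:
--         for j in ["+","^","%","[","]","{","}","(",")","~"]:
--             if li==j:
--                 listpass[i]="{"+str(j)+"}"
--         i+=1
--     return "".join(listpass)
-- ===== SOURCE B (Python) =====
-- def creatpass(passW):
--     # collect the positions of each special character, then rebuild the
--     # string by stitching the untouched slices between sorted hit positions
--     hits = []
--     for c in "+^%[]{}()~":
--         hits += [(i, ch) for i, ch in enumerate(passW) if ch == c]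
--     hits.sort(key=lambda h: h[0])
--     prev = 0
--     parts = []
--     for i, ch in hits:
--         parts.append(passW[prev:i])
--         parts.append("{" + ch + "}")
--         prev = i + 1
--     parts.append(passW[prev:])
--     return "".join(parts)
-- ===== Notes on version B (the rewrite author's own statement) =====
-- stated objective: alternative
-- what changed: Instead of A's nested per-character/per-special scan mutating a list in place, B collects the occurrence positions of each special character, sorts them, and rebuilds the string by stitching the untouched slices between the sorted hit positions.
import Mathlib
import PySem

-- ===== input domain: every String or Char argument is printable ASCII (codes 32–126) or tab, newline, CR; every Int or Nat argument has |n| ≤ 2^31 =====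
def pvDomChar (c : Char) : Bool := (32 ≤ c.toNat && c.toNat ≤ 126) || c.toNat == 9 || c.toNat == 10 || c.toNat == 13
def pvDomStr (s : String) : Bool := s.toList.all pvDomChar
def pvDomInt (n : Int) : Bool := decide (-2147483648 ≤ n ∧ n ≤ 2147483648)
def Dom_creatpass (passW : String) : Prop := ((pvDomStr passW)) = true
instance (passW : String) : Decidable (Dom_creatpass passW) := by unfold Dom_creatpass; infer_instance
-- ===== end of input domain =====

-- B replaces A's nested loop (per character, a linear scan of the ten specials, mutating the
-- list at an index counter) by a different strategy: collect the occurrence positions of each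
-- special character, sort them, and rebuild the string by stitching the slices between hits.

-- ===== PORT A =====
-- Python's 1-char strings are ported as Char; 'li == j' is the char comparison.
def creatpassSpecials : List Char := ['+', '^', '%', '[', ']', '{', '}', '(', ')', '~']

-- the inner 'for j in [...]' loop: replace listpass[i] whenever li == j
def creatpassInner (li : Char) (i : Nat) (acc : List String) : List String :=
  creatpassSpecials.foldl
    (fun acc j => if li == j then acc.set i ("{" ++ String.ofList [j] ++ "}") else acc) acc

def creatpass (passW : String) : String :=
  let lists := passW.toList
  let listpass : List String := lists.map (fun c => String.ofList [c])
  let res := lists.foldl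
    (fun (st : Nat × List String) li => (st.1 + 1, creatpassInner li st.1 st.2))
    (0, listpass)
  String.join res.2

-- ===== PORT B =====
-- the loop body of B's stitching pass: emit the untouched slice [prev:i] and '{ch}', prev := i+1
def creatpassStep (full : List Char) (st : Int × List String) (h : Int × Char) : Int × List String :=
  (h.1 + 1,
   st.2 ++ [String.ofList (PySem.List.slice full (some st.1) (some h.1)),
            "{" ++ String.ofList [h.2] ++ "}"])

def creatpass_alt (passW : String) : String :=
  let l := passW.toList
  -- hits: for each special c, the (index, char) pairs of its occurrences
  let hits0 : List (Int × Char) :=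
    ("+^%[]{}()~".toList).foldl
      (fun acc c => acc ++ (PySem.List.enumerate l).filter (fun p => p.2 == c)) []
  let hits := PySem.List.sorted hits0 (fun h => h.1)
  let st := hits.foldl (creatpassStep l) ((0 : Int), ([] : List String))
  String.join (st.2 ++ [String.ofList (PySem.List.slice l (some st.1) none)])

-- ===== PRECONDITION & SPEC =====
def Spec_creatpass (passW : String) (out : String) : Prop := out = creatpass_alt passW
instance (passW : String) (out : String) : Decidable (Spec_creatpass passW out) := by unfold Spec_creatpass; infer_instance

-- ===== CLAIM (what is proved, stated in full; the proofs are below) =====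
def Claim_equal_creatpass : Prop := ∀ (passW : String), Dom_creatpass passW → Spec_creatpass passW (creatpass passW)

-- ===== LEMMAS AND PROOFS =====

-- the per-character translation, as a string and as a char list
def pvTrS (c : Char) : String :=
  if c ∈ creatpassSpecials then "{" ++ String.ofList [c] ++ "}" else String.ofList [c]
def pvTr (c : Char) : List Char :=
  if c ∈ creatpassSpecials then ['{', c, '}'] else [c]
-- flattened character content of a list of string parts
def pvJ (ps : List String) : List Char := (ps.map String.toList).flatten

theorem pvTrS_toList (c : Char) : (pvTrS c).toList = pvTr c := by
  unfold pvTrS pvTr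
  split_ifs <;> simp

theorem toList_join (ps : List String) : (String.join ps).toList = pvJ ps := by
  suffices h : ∀ (ps : List String) (acc : String),
      (ps.foldl (fun r s => r ++ s) acc).toList = acc.toList ++ pvJ ps by
    simpa [String.join] using h ps ""
  intro ps
  induction ps with
  | nil => intro acc; simp [pvJ]
  | cons p ps ih => intro acc; simp [List.foldl, ih, pvJ]

-- ---------- A-side: the nested loop translates each character ----------

theorem creatpassInner_eq (li : Char) (i : Nat) (acc : List String) :
    creatpassInner li i acc =
      if li ∈ creatpassSpecials then acc.set i ("{" ++ String.ofList [li] ++ "}") else acc := by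
  by_cases h : li ∈ creatpassSpecials
  · rw [if_pos h]
    revert h
    simp only [creatpassSpecials, List.mem_cons, List.not_mem_nil, or_false]
    intro h
    rcases h with h | h | h | h | h | h | h | h | h | h <;> subst h <;>
      simp [creatpassInner, creatpassSpecials, List.foldl]
  · rw [if_neg h]
    revert h
    simp only [creatpassSpecials, List.mem_cons, List.not_mem_nil, or_false]
    intro h
    push_neg at h
    obtain ⟨h1, h2, h3, h4, h5, h6, h7, h8, h9, h10⟩ := h
    simp [creatpassInner, creatpassSpecials, List.foldl, h1, h2, h3, h4, h5, h6, h7, h8, h9, h10]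

theorem set_at_prefix (done : List String) (x v : String) (tail : List String) :
    (done ++ x :: tail).set done.length v = done ++ v :: tail := by
  induction done with
  | nil => rfl
  | cons d ds ih => simp [ih]

theorem inner_tr (li : Char) (done : List String) (tail : List String) :
    creatpassInner li done.length (done ++ String.ofList [li] :: tail) =
      done ++ pvTrS li :: tail := by
  rw [creatpassInner_eq]
  unfold pvTrS
  by_cases h : li ∈ creatpassSpecials
  · rw [if_pos h, if_pos h, set_at_prefix]
  · rw [if_neg h, if_neg h]

theorem outer_loop (rest : List Char) :
    ∀ done : List String,
      (rest.foldl
        (fun (st : Nat × List String) li => (st.1 + 1, creatpassInner li st.1 st.2))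
        (done.length, done ++ rest.map (fun c => String.ofList [c]))).2
      = done ++ rest.map pvTrS := by
  induction rest with
  | nil => intro done; simp
  | cons r rs ih =>
    intro done
    simp only [List.map, List.foldl]
    rw [inner_tr r done]
    have h : done ++ pvTrS r :: rs.map (fun c => String.ofList [c]) =
        (done ++ [pvTrS r]) ++ rs.map (fun c => String.ofList [c]) := by simp
    have hlen : done.length + 1 = (done ++ [pvTrS r]).length := by simp
    rw [h, hlen, ih (done ++ [pvTrS r])]
    simp

theorem creatpass_chars (passW : String) :
    (creatpass passW).toList = passW.toList.flatMap pvTr := by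
  have h := outer_loop passW.toList []
  simp only [List.nil_append, List.length_nil] at h
  show (String.join (passW.toList.foldl
      (fun (st : Nat × List String) li => (st.1 + 1, creatpassInner li st.1 st.2))
      (0, passW.toList.map (fun c => String.ofList [c]))).2).toList
    = passW.toList.flatMap pvTr
  rw [h, toList_join]
  simp [pvJ, List.flatMap, Function.comp_def, pvTrS_toList]

-- ---------- B-side step 1: the sorted hit list is the filtered enumeration ----------

theorem count_filter_eq {α : Type} [BEq α] [LawfulBEq α] (a : α) (p : α → Bool) (l : List α) :
    List.count a (l.filter p) = if p a then List.count a l else 0 := by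
  by_cases h : p a = true
  · rw [if_pos h, List.count_filter h]
  · rw [if_neg h]
    refine List.count_eq_zero_of_not_mem ?_
    intro hm
    exact h (List.of_mem_filter hm)

theorem count_flatMap_filter (cs : List Char) (e : List (Int × Char)) (a : Int × Char) :
    List.count a (cs.flatMap (fun c => e.filter (fun p => p.2 == c)))
      = (cs.count a.2) * List.count a e := by
  induction cs with
  | nil => simp
  | cons c cs ih =>
    rw [List.flatMap_cons, List.count_append, ih, count_filter_eq, List.count_cons]
    by_cases h : a.2 = c
    · subst h
      simp only [beq_self_eq_true, if_true]
      ring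
    · have hb : (a.2 == c) = false := by simp [h]
      have hb2 : (c == a.2) = false := by
        simp only [beq_eq_false_iff_ne]
        exact fun hh => h hh.symm
      simp only [hb, hb2, Bool.false_eq_true, if_false]
      ring

theorem hits_perm (e : List (Int × Char)) :
    (e.filter (fun p => creatpassSpecials.contains p.2)).Perm
      (creatpassSpecials.flatMap (fun c => e.filter (fun p => p.2 == c))) := by
  refine List.perm_iff_count.mpr ?_
  intro a
  rw [count_flatMap_filter, count_filter_eq]
  by_cases h : a.2 ∈ creatpassSpecials
  · have h1 : creatpassSpecials.count a.2 = 1 :=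
      List.count_eq_one_of_mem (by decide) h
    have h2 : creatpassSpecials.contains a.2 = true := by
      simpa using h
    rw [if_pos h2, h1, one_mul]
  · have h1 : creatpassSpecials.count a.2 = 0 := List.count_eq_zero_of_not_mem h
    have h2 : creatpassSpecials.contains a.2 = false := by
      simpa using h
    rw [if_neg (by simpa using h), h1, zero_mul]

theorem sorted_hits (l : List Char) :
    PySem.List.sorted
      (creatpassSpecials.flatMap (fun c => (PySem.List.enumerate l).filter (fun p => p.2 == c)))
      (fun h => h.1)
    = (PySem.List.enumerate l).filter (fun p => creatpassSpecials.contains p.2) := by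
  refine PySem.List.sorted_eq_of_perm_of_pairwise_lt _ _ _ (hits_perm _) ?_
  exact (PySem.List.pairwise_lt_enumerate l 0).sublist List.filter_sublist

-- ---------- B-side step 2: stitching the slices between hits rebuilds the translation ----------

theorem stitch (full : List Char) (l2 : List Char) :
    ∀ (k prev : Nat) (acc : List String) (pend : List Char),
      full.drop prev = pend ++ l2 → pend.length + prev = k →
      pvJ ((((PySem.List.enumerate l2 (k : Int)).filter
              (fun p => creatpassSpecials.contains p.2)).foldl
              (creatpassStep full) ((prev : Int), acc)).2
            ++ [String.ofList (PySem.List.slice full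
                  (some ((((PySem.List.enumerate l2 (k : Int)).filter
                    (fun p => creatpassSpecials.contains p.2)).foldl
                    (creatpassStep full) ((prev : Int), acc)).1)) none)])
        = pvJ acc ++ pend ++ l2.flatMap pvTr := by
  induction l2 with
  | nil =>
    intro k prev acc pend hdrop _
    simp only [PySem.List.enumerate, List.filter_nil, List.foldl_nil]
    rw [PySem.List.slice_from_natCast, hdrop]
    simp [pvJ]
  | cons c rest ih =>
    intro k prev acc pend hdrop hk
    rw [PySem.List.enumerate_cons, List.filter_cons]
    by_cases hc : c ∈ creatpassSpecials
    · have hcc : creatpassSpecials.contains c = true := by simpa using hc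
      simp only [hcc, if_pos, List.foldl_cons]
      have hcast : ((k : Int) + 1) = ((k + 1 : Nat) : Int) := by push_cast; ring
      have hslice : PySem.List.slice full (some ((prev : Nat) : Int)) (some ((k : Nat) : Int))
          = pend := by
        rw [PySem.List.slice_natCast, hdrop]
        have : k - prev = pend.length := by omega
        rw [this]
        exact List.take_left ..
      have hstep : creatpassStep full ((prev : Int), acc) ((k : Int), c)
          = (((k + 1 : Nat) : Int), acc ++ [String.ofList pend, "{" ++ String.ofList [c] ++ "}"]) := by
        unfold creatpassStep
        rw [hslice, hcast]
      rw [hstep, hcast]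
      have hdrop' : full.drop (k + 1) = [] ++ rest := by
        have h1 : full.drop (k + 1) = (full.drop prev).drop (pend.length + 1) := by
          rw [List.drop_drop]
          congr 1
          omega
        rw [h1, hdrop]
        have h2 : pend ++ c :: rest = (pend ++ [c]) ++ rest := by simp
        rw [h2]
        have h3 : pend.length + 1 = (pend ++ [c]).length := by simp
        rw [h3, List.drop_left]
        rfl
      have := ih (k + 1) (k + 1) (acc ++ [String.ofList pend, "{" ++ String.ofList [c] ++ "}"]) []
        hdrop' (by simp)
      rw [this]
      have htr : pvTr c = ['{', c, '}'] := by simp [pvTr, hc]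
      simp [pvJ, htr]
    · have hcc : creatpassSpecials.contains c = false := by simpa using hc
      simp only [hcc, Bool.false_eq_true, if_false]
      have hdrop' : full.drop prev = (pend ++ [c]) ++ rest := by
        rw [hdrop]; simp
      have := ih (k + 1) prev acc (pend ++ [c]) hdrop' (by simp; omega)
      rw [show (((k + 1 : Nat)) : Int) = ((k : Int) + 1) by push_cast; ring] at this
      rw [this]
      have htr : pvTr c = [c] := by simp [pvTr, hc]
      simp [htr]

theorem creatpass_alt_chars (passW : String) :
    (creatpass_alt passW).toList = passW.toList.flatMap pvTr := by
  unfold creatpass_alt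
  simp only [PySem.List.foldl_append_eq_flatMap, List.nil_append]
  have hsp : "+^%[]{}()~".toList = creatpassSpecials := by decide
  rw [hsp, sorted_hits, toList_join]
  have := stitch passW.toList passW.toList 0 0 [] [] (by simp) (by simp)
  simpa [pvJ] using this

-- ===== VERDICT (by name: the statement is the Claim_ definition above) =====
theorem creatpass_spec : Claim_equal_creatpass := by
  intro passW _
  show creatpass passW = creatpass_alt passW
  have h : (creatpass passW).toList = (creatpass_alt passW).toList := by
    rw [creatpass_chars, creatpass_alt_chars]
  exact String.ext (by simpa [String.toList] using h)
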